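-- pv_equiv track=rewrite | github.com/albertolanzini/AdventOfCode2023 | python/day11/day11.py | _solve
-- ===== SOURCE A (Python) =====
-- from typing import List
--
-- def _solve(data: List[int]) -> int:
--     c, n = 0, 1000000
--     for i, a in enumerate(data):
--         d = 0
--         for b in data[i + 1 :]:
--             d += (b != 0) or n
--             c += d * a * b
--     return c
-- ===== SOURCE B (Python) =====
-- from typing import List
--
-- def _solve(data: List[int]) -> int:
--     n = 1000000
--     c = 0
--     P = 0  # prefix sum of weights (1 for nonzero, n for zero)
--     S = 0  # sum of earlier elements a_i
--     T = 0  # sum of a_i * P_i over earlier elements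
--     for x in data:
--         P += 1 if x != 0 else n
--         c += x * (P * S - T)
--         S += x
--         T += x * P
--     return c
-- ===== Notes on version B (the rewrite author's own statement) =====
-- stated objective: faster
-- what changed: Replaces the quadratic nested loop over all pairs by a single pass maintaining a prefix weight sum P and running accumulators S = sum of earlier elements and T = sum of earlier a_i*P_i, so each element's pairwise contribution is x*(P*S - T).
import Mathlib
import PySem

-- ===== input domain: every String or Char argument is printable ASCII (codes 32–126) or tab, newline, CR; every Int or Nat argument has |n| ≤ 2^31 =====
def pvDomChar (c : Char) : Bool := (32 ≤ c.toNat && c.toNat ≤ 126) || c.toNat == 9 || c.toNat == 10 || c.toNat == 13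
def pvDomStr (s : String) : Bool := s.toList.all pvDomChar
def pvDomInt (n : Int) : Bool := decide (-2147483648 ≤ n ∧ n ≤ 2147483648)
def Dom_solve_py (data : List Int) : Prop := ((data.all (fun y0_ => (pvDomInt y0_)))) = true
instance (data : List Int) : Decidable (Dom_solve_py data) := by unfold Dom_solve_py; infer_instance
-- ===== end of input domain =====

-- B replaces A's O(n^2) pairwise double loop by one O(n) pass with prefix-weight and running accumulators.

-- ===== PORT A =====
-- inner loop: 'for b in data[i+1:]: d += (b != 0) or n; c += d * a * b', state (d, c) starting at (0, c)
def solvePyInner (a : Int) (rest : List Int) (c : Int) : Int :=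
  (rest.foldl (fun (dc : Int × Int) b =>
      let d := dc.1 + (if b ≠ 0 then 1 else 1000000)
      (d, dc.2 + d * a * b)) (0, c)).2

-- outer loop: 'for i, a in enumerate(data)'; at step i the slice data[i+1:] is exactly the remaining tail
def solvePyGo : List Int → Int → Int
  | [], c => c
  | a :: rest, c => solvePyGo rest (solvePyInner a rest c)

def solve_py (data : List Int) : Int := solvePyGo data 0

-- ===== PORT B =====
-- single pass, state (P, c, S, T)
def solve_py_alt (data : List Int) : Int :=
  (data.foldl (fun (s : Int × Int × Int × Int) x =>
      let P := s.1 + (if x ≠ 0 then 1 else 1000000)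
      (P, s.2.1 + x * (P * s.2.2.1 - s.2.2.2), s.2.2.1 + x, s.2.2.2 + x * P))
    (0, 0, 0, 0)).2.1

-- ===== PRECONDITION & SPEC =====
def Spec_solve_py (data : List Int) (out : Int) : Prop := out = solve_py_alt data
instance (data : List Int) (out : Int) : Decidable (Spec_solve_py data out) := by unfold Spec_solve_py; infer_instance

-- ===== CLAIM (what is proved, stated in full; the proofs are below) =====
def Claim_equal_solve_py : Prop := ∀ (data : List Int), Dom_solve_py data → Spec_solve_py data (solve_py data)

-- ===== LEMMAS AND PROOFS =====

-- weight of an element, as in both programs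
def pvW (x : Int) : Int := if x ≠ 0 then 1 else 1000000

-- Σ_j (P + prefix-weight up to j) * x_j over a list
def pvH (P : Int) : List Int → Int
  | [] => 0
  | x :: t => (P + pvW x) * x + pvH (P + pvW x) t

theorem pvH_shift (l : List Int) : ∀ (P Q : Int), pvH (P + Q) l = P * l.sum + pvH Q l := by
  induction l with
  | nil => intro P Q; simp [pvH]
  | cons x t ih =>
      intro P Q
      simp only [pvH, List.sum_cons]
      have h := ih P (Q + pvW x)
      have e : P + Q + pvW x = P + (Q + pvW x) := by ring
      rw [e, h]; ring

theorem solvePyInner_spec (l : List Int) : ∀ (a d0 c : Int),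
    (l.foldl (fun (dc : Int × Int) b =>
        let d := dc.1 + (if b ≠ 0 then 1 else 1000000)
        (d, dc.2 + d * a * b)) (d0, c)).2 = c + a * pvH d0 l := by
  induction l with
  | nil => intro a d0 c; simp [pvH]
  | cons x t ih =>
      intro a d0 c
      simp only [List.foldl_cons, pvH]
      rw [ih]
      simp only [pvW]
      ring

theorem solvePyInner_eq (a : Int) (l : List Int) (c : Int) :
    solvePyInner a l c = c + a * pvH 0 l := by
  unfold solvePyInner; rw [solvePyInner_spec]

theorem solvePyGo_add (l : List Int) : ∀ (c : Int), solvePyGo l c = c + solvePyGo l 0 := by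
  induction l with
  | nil => intro c; simp [solvePyGo]
  | cons a t ih =>
      intro c
      simp only [solvePyGo, solvePyInner_eq]
      rw [ih, ih (0 + a * pvH 0 t)]
      ring

theorem solve_py_key (l : List Int) : ∀ (P c S T : Int),
    (l.foldl (fun (s : Int × Int × Int × Int) x =>
        let P := s.1 + (if x ≠ 0 then 1 else 1000000)
        (P, s.2.1 + x * (P * s.2.2.1 - s.2.2.2), s.2.2.1 + x, s.2.2.2 + x * P))
      (P, c, S, T)).2.1 = c + S * pvH P l - T * l.sum + solvePyGo l 0 := by
  induction l with
  | nil => intro P c S T; simp [solvePyGo, pvH]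
  | cons x t ih =>
      intro P c S T
      simp only [List.foldl_cons, solvePyGo, List.sum_cons, pvH]
      rw [ih, solvePyGo_add t (solvePyInner x t 0), solvePyInner_eq]
      have hs : pvH (P + pvW x) t = P * t.sum + pvH (pvW x) t := pvH_shift t P (pvW x)
      have hs0 : pvH (pvW x) t = pvW x * t.sum + pvH 0 t := by
        have := pvH_shift t (pvW x) 0; simpa using this
      simp only [pvW] at hs hs0 ⊢
      rw [hs, hs0]
      ring

-- ===== VERDICT (by name: the statement is the Claim_ definition above) =====
theorem solve_py_spec : Claim_equal_solve_py := by
  intro data _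
  unfold Spec_solve_py solve_py solve_py_alt
  rw [solve_py_key]
  simp
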